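-- pv_equiv track=rewrite | github.com/smit86170-create/whats- | test_new/prompt_parser_patched_superhybrid_2.8_1.3(вернул обычные and).py | _has_multiple_bracket_blocks
-- ===== SOURCE A (Python) =====
-- def _has_multiple_bracket_blocks(s: str) -> bool:
--     """Проверить, есть ли более одного независимого блока ``[...]``.
--
--     Игнорирует экранированные скобки и вложенные уровни, чтобы не считать
--     ``[[nested]]`` как два блока. Возвращает ``True`` при втором входе в
--     глубину 1.
--     """
--     depth = 0
--     blocks = 0
--     i = 0
--     while i < len(s):
--         ch = s[i]
--         if ch == "\\":
--             i += 2
--             continue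
--         if ch == "[":
--             depth += 1
--             if depth == 1:
--                 blocks += 1
--                 if blocks >= 2:
--                     return True
--         elif ch == "]" and depth > 0:
--             depth -= 1
--         i += 1
--     return False
-- ===== SOURCE B (Python) =====
-- def _has_multiple_bracket_blocks(s: str) -> bool:
--     # Pass 1: drop every escape sequence (backslash + the following char).
--     cleaned = []
--     it = iter(s)
--     for ch in it:
--         if ch == "\\":
--             next(it, None)  # discard the escaped character (if any)
--         else:
--             cleaned.append(ch)
--     # Pass 2: depth scan; a second entry into depth 1 means a second block.
--     depth = 0
--     seen = False
--     for ch in cleaned: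
--         if ch == "[":
--             if depth == 0:
--                 if seen:
--                     return True
--                 seen = True
--             depth += 1
--         elif ch == "]" and depth > 0:
--             depth -= 1
--     return False
-- ===== Notes on version B (the rewrite author's own statement) =====
-- stated objective: faster
-- what changed: B splits A's single index-juggling while-loop (escape skipping via i+=2 interleaved with block counting) into two passes: first strip all escape sequences into a cleaned list, then a plain depth scan with a boolean flag instead of a block counter; iterating directly over characters instead of indexing s[i] makes it measurably faster.
import Mathlib
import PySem

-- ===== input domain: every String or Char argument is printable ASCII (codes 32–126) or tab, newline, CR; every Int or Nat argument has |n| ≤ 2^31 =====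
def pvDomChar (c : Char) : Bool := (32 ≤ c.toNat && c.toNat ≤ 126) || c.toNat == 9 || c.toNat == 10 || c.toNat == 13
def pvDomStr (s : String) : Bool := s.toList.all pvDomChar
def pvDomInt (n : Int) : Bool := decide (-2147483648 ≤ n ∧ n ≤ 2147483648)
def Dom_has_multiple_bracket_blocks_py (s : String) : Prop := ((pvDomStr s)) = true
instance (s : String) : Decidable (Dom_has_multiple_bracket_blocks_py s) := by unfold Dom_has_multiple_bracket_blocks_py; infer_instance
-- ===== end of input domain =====

-- B replaces A's single escape-skipping while-loop with two passes (strip escapes, then a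
-- depth scan with a boolean flag); a timing run measured B faster (objective: faster).

-- ===== PORT A =====
-- A's while-loop over index i, transcribed as recursion on the remaining characters;
-- 'i += 2; continue' after a backslash becomes dropping the next character.
def pyA_loop : List Char → Nat → Nat → Bool
  | [], _, _ => false
  | c :: rest, depth, blocks =>
    if c = '\\' then
      pyA_loop (rest.drop 1) depth blocks
    else if c = '[' then
      if depth + 1 = 1 then
        if blocks + 1 ≥ 2 then true
        else pyA_loop rest (depth + 1) (blocks + 1)
      else pyA_loop rest (depth + 1) blocks
    else if c = ']' ∧ depth > 0 then
      pyA_loop rest (depth - 1) blocks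
    else
      pyA_loop rest depth blocks
termination_by l _ _ => l.length
decreasing_by all_goals (simp only [List.length_cons, List.length_drop]; omega)

def has_multiple_bracket_blocks_py (s : String) : Bool :=
  pyA_loop s.toList 0 0

-- ===== PORT B =====
-- Pass 1 of Source B: remove each backslash together with the character it escapes.
def stripEscapes : List Char → List Char
  | [] => []
  | c :: rest =>
    if c = '\\' then stripEscapes (rest.drop 1)
    else c :: stripEscapes rest
termination_by l => l.length
decreasing_by all_goals (simp only [List.length_cons, List.length_drop]; omega)

-- Pass 2 of Source B: depth scan with a 'seen a top-level block' flag.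
def scanBlocks : List Char → Nat → Bool → Bool
  | [], _, _ => false
  | c :: rest, depth, seen =>
    if c = '[' then
      if depth = 0 then
        if seen then true else scanBlocks rest (depth + 1) true
      else scanBlocks rest (depth + 1) seen
    else if c = ']' ∧ depth > 0 then
      scanBlocks rest (depth - 1) seen
    else scanBlocks rest depth seen

def has_multiple_bracket_blocks_py_alt (s : String) : Bool :=
  scanBlocks (stripEscapes s.toList) 0 false

-- ===== PRECONDITION & SPEC =====
def Spec_has_multiple_bracket_blocks_py (s : String) (out : Bool) : Prop := out = has_multiple_bracket_blocks_py_alt s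
instance (s : String) (out : Bool) : Decidable (Spec_has_multiple_bracket_blocks_py s out) := by unfold Spec_has_multiple_bracket_blocks_py; infer_instance

-- ===== CLAIM (what is proved, stated in full; the proofs are below) =====
def Claim_equal_has_multiple_bracket_blocks_py : Prop := ∀ (s : String), Dom_has_multiple_bracket_blocks_py s → Spec_has_multiple_bracket_blocks_py s (has_multiple_bracket_blocks_py s)

-- ===== LEMMAS AND PROOFS =====
theorem pyA_loop_eq_scan (l : List Char) (depth blocks : Nat) :
    pyA_loop l depth blocks = scanBlocks (stripEscapes l) depth (decide (blocks ≥ 1)) := by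
  induction l, depth, blocks using pyA_loop.induct with
  | case1 => simp [pyA_loop, stripEscapes, scanBlocks]
  | case2 rest depth blocks ih =>
    simpa [pyA_loop, stripEscapes] using ih
  | case3 rest depth blocks h1 h2 h3 =>
    have hd : depth = 0 := by omega
    have hb : blocks ≥ 1 := by omega
    subst hd
    simp [pyA_loop, stripEscapes, scanBlocks, h2, hb]
  | case4 rest depth blocks h1 h2 h3 ih =>
    have hd : depth = 0 := by omega
    have hb : ¬ blocks ≥ 1 := by omega
    subst hd
    simp only [pyA_loop, stripEscapes] at ih ⊢
    simp [scanBlocks, h2, hb] at ih ⊢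
    exact ih
  | case5 rest depth blocks h1 h2 ih =>
    have hd : ¬ depth = 0 := by omega
    simp only [pyA_loop, stripEscapes] at ih ⊢
    simp [scanBlocks, hd] at ih ⊢
    exact ih
  | case6 c rest depth blocks h1 h2 h3 ih =>
    obtain ⟨hc, hdp⟩ := h3
    subst hc
    simp only [pyA_loop, stripEscapes] at ih ⊢
    simp [scanBlocks, hdp] at ih ⊢
    exact ih
  | case7 c rest depth blocks h1 h2 h3 ih =>
    simp only [pyA_loop, stripEscapes] at ih ⊢
    simp [scanBlocks, h1, h2, h3] at ih ⊢
    exact ih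

-- ===== VERDICT (by name: the statement is the Claim_ definition above) =====
theorem has_multiple_bracket_blocks_py_spec : Claim_equal_has_multiple_bracket_blocks_py := by
  intro s _
  unfold Spec_has_multiple_bracket_blocks_py has_multiple_bracket_blocks_py has_multiple_bracket_blocks_py_alt
  simpa using pyA_loop_eq_scan s.toList 0 0
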